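-- pv_equiv track=rewrite | github.com/LMJayasundara/rex_project | test.py | f
-- ===== SOURCE A (Python) =====
-- def f(start, end, gap, bins):
--     arr = [None] * bins
--     mid_index = len(arr)//2
--     arr[0] = start
--     arr[bins-1] = end
--     arr[mid_index] = end//2
--
--     for index, val in enumerate(arr):
--         if (index < mid_index and val == None):
--             for mul, i in enumerate(range(index, 0, -1)):
--                 if end//2 - (gap * (mul+1)) > 0:
--                     arr[i] = end//2 - (gap * (mul+1))
--                 else:
--                     arr[i] = 0
--
--         elif (index > mid_index and val == None):
--             for mul, i in enumerate(range(index, len(arr)-1, 1)):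
--                 if end//2 + (gap * (mul+1)) < end:
--                     arr[i] = end//2 + (gap * (mul+1))
--                 else:
--                     arr[i] = end
--     return arr
-- ===== SOURCE B (Python) =====
-- def f(start, end, gap, bins):
--     # Closed form per cell: each cell's value comes from its last writer in A's
--     # O(bins^2) repainting loops, so one O(bins) pass suffices.
--     mid = bins // 2
--     half = end // 2
--     def cell(i):
--         if i == mid:
--             return half
--         if i == 0:
--             return start
--         if i == bins - 1:
--             return end
--         if i < mid:
--             return max(half - gap * (mid - i), 0)
--         return min(half + gap * (i - mid), end)
--     return [cell(i) for i in range(bins)]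
-- ===== Notes on version B (the rewrite author's own statement) =====
-- stated objective: faster
-- what changed: A repaints the whole lower half again at every unfilled index (nested loops, O(bins^2) writes); B computes each cell directly from its last writer's closed form (clamped linear ramp around the midpoint) in one O(bins) pass.
-- crash fix: On bins <= 0 A raises IndexError (arr[0] on an empty list) while B returns []. — e.g. on f(1, 2, 3, 0): A raises IndexError, B returns []
import Mathlib
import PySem

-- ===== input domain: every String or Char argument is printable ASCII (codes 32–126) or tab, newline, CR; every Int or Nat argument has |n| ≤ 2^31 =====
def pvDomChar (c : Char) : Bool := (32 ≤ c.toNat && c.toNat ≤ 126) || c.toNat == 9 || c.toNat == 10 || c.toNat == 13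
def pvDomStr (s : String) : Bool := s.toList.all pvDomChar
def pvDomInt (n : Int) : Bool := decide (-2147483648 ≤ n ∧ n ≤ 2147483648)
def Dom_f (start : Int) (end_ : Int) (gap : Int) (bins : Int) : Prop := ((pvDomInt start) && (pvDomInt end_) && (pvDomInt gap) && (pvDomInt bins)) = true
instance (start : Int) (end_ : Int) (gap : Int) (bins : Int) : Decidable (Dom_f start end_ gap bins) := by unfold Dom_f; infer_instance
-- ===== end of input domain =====

-- B replaces A's quadratic repainting loops by one closed-form O(bins) pass (same return values).

-- ===== PORT A =====
-- inner loop 'for mul, i in enumerate(range(index, 0, -1)): ...' of A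
def fLowerPass (end_ : Int) (gap : Int) (index : Int) (arr : List (Option Int)) : List (Option Int) :=
  (PySem.List.enumerate (PySem.List.pyRange index 0 (-1))).foldl (fun a p =>
    if PySem.Int.floordiv end_ 2 - gap * (p.1 + 1) > 0 then
      PySem.List.pySetD a p.2 (some (PySem.Int.floordiv end_ 2 - gap * (p.1 + 1)))
    else
      PySem.List.pySetD a p.2 (some 0)) arr

-- inner loop 'for mul, i in enumerate(range(index, len(arr)-1, 1)): ...' of A
def fUpperPass (end_ : Int) (gap : Int) (index : Int) (arr : List (Option Int)) : List (Option Int) :=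
  (PySem.List.enumerate (PySem.List.pyRange index (PySem.List.len arr - 1) 1)).foldl (fun a p =>
    if PySem.Int.floordiv end_ 2 + gap * (p.1 + 1) < end_ then
      PySem.List.pySetD a p.2 (some (PySem.Int.floordiv end_ 2 + gap * (p.1 + 1)))
    else
      PySem.List.pySetD a p.2 (some end_)) arr

-- 'for index, val in enumerate(arr)' iterates positions of the live (mutated) list, reading arr[index] each step
def f (start : Int) (end_ : Int) (gap : Int) (bins : Int) : List (Option Int) :=
  let arr0 := List.replicate bins.toNat (none : Option Int)
  let mid := PySem.Int.floordiv (PySem.List.len arr0) 2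
  let arr1 := PySem.List.pySetD arr0 0 (some start)
  let arr2 := PySem.List.pySetD arr1 (bins - 1) (some end_)
  let arr3 := PySem.List.pySetD arr2 mid (some (PySem.Int.floordiv end_ 2))
  (PySem.List.pyRange 0 (PySem.List.len arr3) 1).foldl (fun arr index =>
    if index < mid ∧ PySem.List.pyGetD arr index none = none then
      fLowerPass end_ gap index arr
    else if index > mid ∧ PySem.List.pyGetD arr index none = none then
      fUpperPass end_ gap index arr
    else arr) arr3


-- ===== PORT B =====
def f_alt (start : Int) (end_ : Int) (gap : Int) (bins : Int) : List (Option Int) :=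
  let mid := PySem.Int.floordiv bins 2
  let half := PySem.Int.floordiv end_ 2
  (PySem.List.pyRange 0 bins 1).map (fun i =>
    if i = mid then some half
    else if i = 0 then some start
    else if i = bins - 1 then some end_
    else if i < mid then some (max (half - gap * (mid - i)) 0)
    else some (min (half + gap * (i - mid)) end_))


-- ===== PRECONDITION & SPEC =====
-- A raises IndexError (arr[0] on the empty list) for bins ≤ 0; Pre_ excludes exactly those inputs.
def Pre_f (start : Int) (end_ : Int) (gap : Int) (bins : Int) : Prop := 1 ≤ bins
instance (start : Int) (end_ : Int) (gap : Int) (bins : Int) : Decidable (Pre_f start end_ gap bins) := by unfold Pre_f; infer_instance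
def pvWitness_f : Int × Int × Int × Int := (3, 20, 2, 9)

-- On bins ≤ 0 A raises IndexError (arr[0] on an empty list) while B returns [].
def Raises_f (start : Int) (end_ : Int) (gap : Int) (bins : Int) : Prop := bins ≤ 0
instance (start : Int) (end_ : Int) (gap : Int) (bins : Int) : Decidable (Raises_f start end_ gap bins) := by unfold Raises_f; infer_instance
def pvRaiseWitness_f : Int × Int × Int × Int := (1, 2, 3, 0)
def pvRaiseWitnessOut_f : List (Option Int) := []

def Spec_f (start : Int) (end_ : Int) (gap : Int) (bins : Int) (out : List (Option Int)) : Prop := out = f_alt start end_ gap bins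
instance (start : Int) (end_ : Int) (gap : Int) (bins : Int) (out : List (Option Int)) : Decidable (Spec_f start end_ gap bins out) := by unfold Spec_f; infer_instance

-- ===== CLAIM (what is proved, stated in full; the proofs are below) =====
def Claim_equal_f : Prop := ∀ (start : Int) (end_ : Int) (gap : Int) (bins : Int), Dom_f start end_ gap bins → Pre_f start end_ gap bins → Spec_f start end_ gap bins (f start end_ gap bins)
def Claim_raises_f : Prop := (∀ (start : Int) (end_ : Int) (gap : Int) (bins : Int), Dom_f start end_ gap bins → Raises_f start end_ gap bins → ¬ Pre_f start end_ gap bins) ∧ (Dom_f (pvRaiseWitness_f.1) (pvRaiseWitness_f.2.1) (pvRaiseWitness_f.2.2.1) (pvRaiseWitness_f.2.2.2) ∧ Raises_f (pvRaiseWitness_f.1) (pvRaiseWitness_f.2.1) (pvRaiseWitness_f.2.2.1) (pvRaiseWitness_f.2.2.2) ∧ f_alt (pvRaiseWitness_f.1) (pvRaiseWitness_f.2.1) (pvRaiseWitness_f.2.2.1) (pvRaiseWitness_f.2.2.2) = pvRaiseWitnessOut_f)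

-- ===== LEMMAS AND PROOFS =====
-- cl0/clE: the clamped values A's two inner loops write; stf: the state of A's array
-- after the initial three writes and k iterations of the outer loop.
def cl0 (v : Int) : Int := if v > 0 then v else 0
def clE (end_ : Int) (v : Int) : Int := if v < end_ then v else end_

def stf (start : Int) (end_ : Int) (gap : Int) (n : Nat) (k : Nat) (j : Nat) : Option Int :=
  if j = n / 2 then some (PySem.Int.floordiv end_ 2)
  else if j = n - 1 then some end_
  else if j = 0 then some start
  else if j < n / 2 then
    (if j ≤ min (k - 1) (n / 2 - 1) then
       some (cl0 (PySem.Int.floordiv end_ 2 - gap * (((min (k - 1) (n / 2 - 1) : Nat) : Int) - (j : Int) + 1)))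
     else none)
  else if n / 2 + 2 ≤ k then
    some (clE end_ (PySem.Int.floordiv end_ 2 + gap * ((j : Int) - ((n / 2 : Nat) : Int))))
  else none

lemma set_map_range {α : Type} (F : Nat → α) (n i : Nat) (v : α) :
    ((List.range n).map F).set i v = (List.range n).map (fun j => if j = i then v else F j) := by
  apply List.ext_getElem
  · simp
  · intro k h1 h2
    simp only [List.getElem_set, List.getElem_map, List.getElem_range]
    split_ifs with h1 h2 h3 <;> first | rfl | omega

lemma foldl_range_inv {α : Type} (g : α → Nat → α) (S : Nat → α) (n : Nat)
    (h : ∀ k, k < n → g (S k) k = S (k + 1)) : (List.range n).foldl g (S 0) = S n := by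
  induction n with
  | zero => simp
  | succ m ih =>
    rw [List.range_succ, List.foldl_append]
    rw [ih (fun k hk => h k (by omega))]
    simpa using h m (by omega)

lemma lower_fold (end_ gap : Int) (n : Nat) :
    ∀ (c : Nat) (s : Int) (F : Nat → Option Int), c < n →
    (PySem.List.enumerate (PySem.List.pyRange (c : Int) 0 (-1)) s).foldl (fun a p =>
        if PySem.Int.floordiv end_ 2 - gap * (p.1 + 1) > 0 then
          PySem.List.pySetD a p.2 (some (PySem.Int.floordiv end_ 2 - gap * (p.1 + 1)))
        else
          PySem.List.pySetD a p.2 (some 0)) ((List.range n).map F)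
    = (List.range n).map (fun j =>
        if 1 ≤ j ∧ j ≤ c then
          some (cl0 (PySem.Int.floordiv end_ 2 - gap * (s + ((c : Int) - (j : Int)) + 1)))
        else F j) := by
  intro c
  induction c with
  | zero =>
    intro s F _
    rw [PySem.List.pyRange_neg_one_eq_nil (by norm_num), PySem.List.enumerate_nil, List.foldl_nil]
    apply List.map_congr_left
    intro j hj
    rw [if_neg (by omega)]
  | succ c ih =>
    intro s F hc
    rw [PySem.List.pyRange_neg_one_cons (by exact_mod_cast Nat.succ_pos c)]
    have h1 : ((c + 1 : Nat) : Int) - 1 = (c : Int) := by push_cast; ring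
    rw [h1, PySem.List.enumerate_cons, List.foldl_cons]
    have hstep : (if PySem.Int.floordiv end_ 2 - gap * (s + 1) > 0 then
          PySem.List.pySetD ((List.range n).map F) ((c + 1 : Nat) : Int) (some (PySem.Int.floordiv end_ 2 - gap * (s + 1)))
        else
          PySem.List.pySetD ((List.range n).map F) ((c + 1 : Nat) : Int) (some 0))
        = (List.range n).map (fun j => if j = c + 1 then some (cl0 (PySem.Int.floordiv end_ 2 - gap * (s + 1))) else F j) := by
      by_cases hv : PySem.Int.floordiv end_ 2 - gap * (s + 1) > 0
      · rw [if_pos hv, PySem.List.pySetD_natCast, set_map_range]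
        simp only [cl0, hv, if_true]
      · rw [if_neg hv, PySem.List.pySetD_natCast, set_map_range]
        simp only [cl0, hv, if_false]
    simp only [hstep]
    rw [ih (s + 1) _ (by omega)]
    apply List.map_congr_left
    intro j hj
    by_cases hj1 : 1 ≤ j ∧ j ≤ c
    · rw [if_pos hj1, if_pos (by omega)]
      have : s + 1 + ((c : Int) - (j : Int)) + 1 = s + (((c + 1 : Nat) : Int) - (j : Int)) + 1 := by
        push_cast; ring
      rw [this]
    · by_cases hj2 : j = c + 1
      · rw [if_neg hj1, if_pos hj2, if_pos (by omega)]
        have : s + 1 = s + (((c + 1 : Nat) : Int) - (j : Int)) + 1 := by subst hj2; push_cast; ring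
        rw [this]
      · rw [if_neg hj1, if_neg hj2, if_neg (by omega)]

lemma upper_fold (end_ gap : Int) (n : Nat) (d : Nat) :
    ∀ (c : Nat) (s : Int) (F : Nat → Option Int), c + d + 1 = n →
    (PySem.List.enumerate (PySem.List.pyRange (c : Int) ((n : Int) - 1) 1) s).foldl (fun a p =>
        if PySem.Int.floordiv end_ 2 + gap * (p.1 + 1) < end_ then
          PySem.List.pySetD a p.2 (some (PySem.Int.floordiv end_ 2 + gap * (p.1 + 1)))
        else
          PySem.List.pySetD a p.2 (some end_)) ((List.range n).map F)
    = (List.range n).map (fun j =>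
        if c ≤ j ∧ (j : Int) ≤ (n : Int) - 2 then
          some (clE end_ (PySem.Int.floordiv end_ 2 + gap * (s + ((j : Int) - (c : Int)) + 1)))
        else F j) := by
  induction d with
  | zero =>
    intro c s F hc
    rw [PySem.List.pyRange_one_eq_nil (by omega), PySem.List.enumerate_nil, List.foldl_nil]
    apply List.map_congr_left
    intro j hj
    rw [if_neg (by simp at hj; omega)]
  | succ d ih =>
    intro c s F hc
    rw [PySem.List.pyRange_one_cons (by omega)]
    rw [PySem.List.enumerate_cons, List.foldl_cons]
    have hstep : (if PySem.Int.floordiv end_ 2 + gap * (s + 1) < end_ then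
          PySem.List.pySetD ((List.range n).map F) ((c : Nat) : Int) (some (PySem.Int.floordiv end_ 2 + gap * (s + 1)))
        else
          PySem.List.pySetD ((List.range n).map F) ((c : Nat) : Int) (some end_))
        = (List.range n).map (fun j => if j = c then some (clE end_ (PySem.Int.floordiv end_ 2 + gap * (s + 1))) else F j) := by
      by_cases hv : PySem.Int.floordiv end_ 2 + gap * (s + 1) < end_
      · rw [if_pos hv, PySem.List.pySetD_natCast, set_map_range]
        simp only [clE, hv, if_true]
      · rw [if_neg hv, PySem.List.pySetD_natCast, set_map_range]
        simp only [clE, hv, if_false]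
    simp only [hstep]
    have h1 : ((c : Nat) : Int) + 1 = ((c + 1 : Nat) : Int) := by push_cast; ring
    rw [h1, ih (c + 1) (s + 1) _ (by omega)]
    apply List.map_congr_left
    intro j hj
    simp only [List.mem_range] at hj
    by_cases hj1 : c + 1 ≤ j ∧ (j : Int) ≤ (n : Int) - 2
    · rw [if_pos hj1, if_pos (by omega)]
      have : s + 1 + ((j : Int) - ((c + 1 : Nat) : Int)) + 1 = s + ((j : Int) - ((c : Nat) : Int)) + 1 := by
        push_cast; ring
      rw [this]
    · by_cases hj2 : j = c
      · rw [if_neg hj1, if_pos hj2, if_pos (by constructor; omega; subst hj2; omega)]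
        have : s + 1 = s + ((j : Int) - ((c : Nat) : Int)) + 1 := by subst hj2; push_cast; ring
        rw [this]
      · rw [if_neg hj1, if_neg hj2, if_neg (by push_cast; omega)]

-- skip cases: iterations of the outer loop that write nothing
lemma stf_skip (start end_ gap : Int) (n k : Nat) (hn : 1 ≤ n)
    (h : k = 0 ∨ k = n / 2 ∨ (k = n / 2 + 1 ∧ k = n - 1) ∨ n / 2 + 2 ≤ k) :
    ∀ j ∈ List.range n, stf start end_ gap n k j = stf start end_ gap n (k + 1) j := by
  intro j hj
  simp only [List.mem_range] at hj
  have hmin : min (k - 1) (n / 2 - 1) = min (k + 1 - 1) (n / 2 - 1) := by omega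
  simp only [stf, ← hmin]
  split_ifs <;> first | rfl | omega

lemma stf_lower_write (start end_ gap : Int) (n k : Nat) (hn : 1 ≤ n) (h1 : 1 ≤ k) (h2 : k < n / 2) :
    ∀ j ∈ List.range n,
      (if 1 ≤ j ∧ j ≤ k then
          some (cl0 (PySem.Int.floordiv end_ 2 - gap * (0 + ((k : Int) - (j : Int)) + 1)))
        else stf start end_ gap n k j)
      = stf start end_ gap n (k + 1) j := by
  intro j hj
  simp only [List.mem_range] at hj
  have hmin : min (k + 1 - 1) (n / 2 - 1) = k := by omega
  by_cases hj1 : 1 ≤ j ∧ j ≤ k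
  · rw [if_pos hj1]
    simp only [stf, hmin]
    rw [if_neg (by omega), if_neg (by omega), if_neg (by omega), if_pos (by omega), if_pos (by omega)]
    have : (0 : Int) + ((k : Int) - (j : Int)) + 1 = (k : Int) - (j : Int) + 1 := by ring
    rw [this]
  · rw [if_neg hj1]
    simp only [stf, hmin]
    split_ifs <;> first | rfl | omega

lemma stf_upper_write (start end_ gap : Int) (n k : Nat) (hn : 1 ≤ n)
    (h1 : k = n / 2 + 1) (h2 : k + 1 ≤ n - 1) :
    ∀ j ∈ List.range n,
      (if k ≤ j ∧ (j : Int) ≤ (n : Int) - 2 then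
          some (clE end_ (PySem.Int.floordiv end_ 2 + gap * (0 + ((j : Int) - (k : Int)) + 1)))
        else stf start end_ gap n k j)
      = stf start end_ gap n (k + 1) j := by
  intro j hj
  simp only [List.mem_range] at hj
  have hmin : min (k - 1) (n / 2 - 1) = min (k + 1 - 1) (n / 2 - 1) := by omega
  by_cases hj1 : k ≤ j ∧ (j : Int) ≤ (n : Int) - 2
  · rw [if_pos hj1]
    simp only [stf]
    rw [if_neg (by omega), if_neg (by omega), if_neg (by omega), if_neg (by omega), if_pos (by omega)]
    have : (0 : Int) + ((j : Int) - (k : Int)) + 1 = (j : Int) - ((n / 2 : Nat) : Int) := by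
      have : (k : Int) = ((n / 2 : Nat) : Int) + 1 := by exact_mod_cast congrArg (Nat.cast (R := Int)) h1
      omega
    rw [this]
  · rw [if_neg hj1]
    simp only [stf, ← hmin]
    split_ifs <;> first | rfl | omega

lemma stf_zero_ne_none (start end_ gap : Int) (n k : Nat) (hmid : 0 < n / 2) :
    stf start end_ gap n k 0 ≠ none := by
  simp only [stf]
  split_ifs <;> simp <;> omega

lemma step_eq (start end_ gap : Int) (n : Nat) (hn : 1 ≤ n) (k : Nat) (hk : k < n) :
    (if ((k : Nat) : Int) < ((n / 2 : Nat) : Int) ∧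
          PySem.List.pyGetD ((List.range n).map (stf start end_ gap n k)) ((k : Nat) : Int) none = none then
        fLowerPass end_ gap ((k : Nat) : Int) ((List.range n).map (stf start end_ gap n k))
      else if ((k : Nat) : Int) > ((n / 2 : Nat) : Int) ∧
          PySem.List.pyGetD ((List.range n).map (stf start end_ gap n k)) ((k : Nat) : Int) none = none then
        fUpperPass end_ gap ((k : Nat) : Int) ((List.range n).map (stf start end_ gap n k))
      else ((List.range n).map (stf start end_ gap n k)))
    = (List.range n).map (stf start end_ gap n (k + 1)) := by
  have hval : PySem.List.pyGetD ((List.range n).map (stf start end_ gap n k)) ((k : Nat) : Int) none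
      = stf start end_ gap n k k := by
    rw [PySem.List.pyGetD_natCast, PySem.List.getD_map_range _ _ _ _ hk]
  rw [hval]
  rcases Nat.lt_or_ge k (n / 2) with hlt | hge
  · -- k < mid
    rcases Nat.eq_zero_or_pos k with h0 | h1
    · -- k = 0 : cell 0 already holds start (or half); no write
      subst h0
      rw [if_neg (by intro h; exact stf_zero_ne_none start end_ gap n 0 hlt h.2),
          if_neg (by intro h; exact absurd h.1 (by push_cast; omega))]
      exact List.map_congr_left (stf_skip start end_ gap n 0 hn (Or.inl rfl))
    · -- 1 ≤ k < mid : lower pass repaints cells 1..k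
      rw [if_pos ⟨by exact_mod_cast hlt, by
        simp only [stf]
        rw [if_neg (by omega), if_neg (by omega), if_neg (by omega), if_pos hlt, if_neg (by omega)]⟩]
      show fLowerPass end_ gap ((k : Nat) : Int) _ = _
      rw [fLowerPass, lower_fold end_ gap n k 0 _ hk]
      exact List.map_congr_left (stf_lower_write start end_ gap n k hn h1 hlt)
  · rcases Nat.eq_or_lt_of_le hge with heq | hgt
    · -- k = mid : cell holds half; no write
      rw [if_neg (by intro h; exact absurd h.1 (by push_cast; omega)),
          if_neg (by intro h; exact absurd h.1 (by push_cast; omega))]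
      exact List.map_congr_left (stf_skip start end_ gap n k hn (Or.inr (Or.inl heq.symm)))
    · rcases Nat.eq_or_lt_of_le hgt with heq1 | hgt1
      · -- k = mid + 1
        have hkm : k = n / 2 + 1 := heq1.symm
        rcases Nat.lt_or_ge (k + 1) n with hlt2 | hge2
        · -- k ≤ n - 2 : upper pass paints cells k..n-2
          rw [if_neg (by intro h; exact absurd h.1 (by push_cast; omega)),
              if_pos ⟨by exact_mod_cast hgt, by
                simp only [stf]
                rw [if_neg (by omega), if_neg (by omega), if_neg (by omega), if_neg (by omega),
                    if_neg (by omega)]⟩]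
          show fUpperPass end_ gap ((k : Nat) : Int) _ = _
          rw [fUpperPass]
          have hlen : PySem.List.len ((List.range n).map (stf start end_ gap n k)) - 1 = (n : Int) - 1 := by
            simp [PySem.List.len_eq]
          rw [hlen, upper_fold end_ gap n (n - k - 1) k 0 _ (by omega)]
          exact List.map_congr_left (stf_upper_write start end_ gap n k hn hkm (by omega))
        · -- k = mid + 1 = n - 1 : cell holds end_; no write
          have hk2 : k = n - 1 := by omega
          rw [if_neg (by intro h; exact absurd h.1 (by push_cast; omega)),
              if_neg (by intro h; exact absurd h.2 (by
                simp only [stf]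
                rw [if_neg (by omega), if_pos hk2]
                simp))]
          exact List.map_congr_left (stf_skip start end_ gap n k hn (Or.inr (Or.inr (Or.inl ⟨hkm, hk2⟩))))
      · -- mid + 2 ≤ k : cell already painted; no write
        have hpaint : stf start end_ gap n k k ≠ none := by
          simp only [stf]
          split_ifs <;> simp <;> omega
        rw [if_neg (by intro h; exact hpaint h.2), if_neg (by intro h; exact hpaint h.2)]
        exact List.map_congr_left (stf_skip start end_ gap n k hn (Or.inr (Or.inr (Or.inr (by omega)))))

lemma cl0_eq_max (v : Int) : cl0 v = max v 0 := by
  unfold cl0; split_ifs <;> omega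

lemma clE_eq_min (e v : Int) : clE e v = min v e := by
  unfold clE; split_ifs <;> omega

lemma final_eq (start end_ gap : Int) (n : Nat) (hn : 1 ≤ n) :
    ∀ j ∈ List.range n,
      stf start end_ gap n n j =
        (if ((j : Nat) : Int) = ((n / 2 : Nat) : Int) then some (PySem.Int.floordiv end_ 2)
         else if ((j : Nat) : Int) = 0 then some start
         else if ((j : Nat) : Int) = ((n : Nat) : Int) - 1 then some end_
         else if ((j : Nat) : Int) < ((n / 2 : Nat) : Int) then
           some (max (PySem.Int.floordiv end_ 2 - gap * (((n / 2 : Nat) : Int) - ((j : Nat) : Int))) 0)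
         else some (min (PySem.Int.floordiv end_ 2 + gap * (((j : Nat) : Int) - ((n / 2 : Nat) : Int))) end_)) := by
  intro j hj
  simp only [List.mem_range] at hj
  by_cases e1 : j = n / 2
  · rw [if_pos (by exact_mod_cast e1)]
    simp only [stf, if_pos e1]
  · rw [if_neg (by exact_mod_cast e1)]
    by_cases e2 : j = 0
    · subst e2
      simp only [stf]
      rw [if_neg e1, if_neg (by omega)]
      simp
    · rw [if_neg (by exact_mod_cast e2)]
      by_cases e3 : j = n - 1
      · simp only [stf]
        rw [if_neg e1, if_pos e3, if_pos (by omega)]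
      · rw [if_neg (by omega)]
        by_cases e4 : j < n / 2
        · simp only [stf]
          rw [if_neg e1, if_neg e3, if_neg e2, if_pos e4, if_pos (by omega),
              if_pos (by exact_mod_cast e4), cl0_eq_max]
          have harg : ((min (n - 1) (n / 2 - 1) : Nat) : Int) - (j : Int) + 1
              = ((n / 2 : Nat) : Int) - (j : Int) := by omega
          rw [harg]
        · simp only [stf]
          rw [if_neg e1, if_neg e3, if_neg e2, if_neg e4, if_pos (by omega),
              if_neg (by exact_mod_cast e4), clE_eq_min]

theorem f_eq_f_alt (start end_ gap bins : Int) (hb : 1 ≤ bins) :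
    f start end_ gap bins = f_alt start end_ gap bins := by
  obtain ⟨n, hn⟩ : ∃ n : Nat, bins = (n : Int) := ⟨bins.toNat, by omega⟩
  have hn1 : 1 ≤ n := by omega
  subst hn
  have hmid : PySem.Int.floordiv ((n : Nat) : Int) 2 = ((n / 2 : Nat) : Int) := by
    exact_mod_cast PySem.Int.floordiv_natCast n 2
  have hrep : List.replicate ((n : Int)).toNat (none : Option Int)
      = (List.range n).map (fun _ => (none : Option Int)) := by
    rw [List.map_const']; simp
  have hinit : PySem.List.pySetD
      (PySem.List.pySetD
        (PySem.List.pySetD (List.replicate ((n : Int)).toNat (none : Option Int)) 0 (some start))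
        (((n : Nat) : Int) - 1) (some end_))
      (((n / 2 : Nat) : Int)) (some (PySem.Int.floordiv end_ 2))
      = (List.range n).map (stf start end_ gap n 0) := by
    rw [show (0 : Int) = ((0 : Nat) : Int) from rfl,
        show ((n : Nat) : Int) - 1 = (((n - 1 : Nat) : Nat) : Int) by omega]
    simp only [PySem.List.pySetD_natCast]
    apply List.ext_getElem
    · simp
    · intro k h1 h2
      simp only [List.length_set, List.length_replicate, Int.toNat_natCast] at h1
      simp only [List.getElem_set, List.getElem_map, List.getElem_range, List.getElem_replicate]
      simp only [stf]
      split_ifs <;> first | rfl | omega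
  simp only [f]
  rw [show PySem.List.len (List.replicate ((n : Int)).toNat (none : Option Int)) = ((n : Nat) : Int) by
        rw [hrep]; simp [PySem.List.len_eq]]
  rw [hmid, hinit]
  rw [show PySem.List.len ((List.range n).map (stf start end_ gap n 0)) = ((n : Nat) : Int) by
        simp [PySem.List.len_eq]]
  rw [PySem.List.pyRange_one]
  simp only [sub_zero, Int.toNat_natCast, zero_add]
  rw [List.foldl_map]
  rw [foldl_range_inv _ (fun k => (List.range n).map (stf start end_ gap n k)) n
        (fun k hk => step_eq start end_ gap n hn1 k hk)]
  simp only [f_alt]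
  rw [hmid, PySem.List.pyRange_one]
  simp only [sub_zero, Int.toNat_natCast, zero_add]
  rw [List.map_map]
  exact List.map_congr_left (final_eq start end_ gap n hn1)

-- ===== VERDICT (by name: the statement is the Claim_ definition above) =====
theorem f_spec : Claim_equal_f := by
  intro start end_ gap bins _ hpre
  unfold Spec_f
  exact f_eq_f_alt start end_ gap bins hpre

@[simp] theorem f_raises : Claim_raises_f := by
  unfold Claim_raises_f
  exact ⟨by intro _ _ _ _ _ hr hp; unfold Raises_f at hr; unfold Pre_f at hp; omega, by decide⟩
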